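-- pv_equiv track=rewrite | github.com/PJ-NBA-472915/cage | src/cage/utils/file_editing_utils.py | validate_line_operations
-- ===== SOURCE A (Python) =====
-- from typing import Optional, Dict, Any, List
--
-- def validate_line_operations(operations: List[Dict[str, Any]]) -> bool:
--     """
--     Validate line-based patch operations.
--
--     Args:
--         operations: List of line-based operations
--
--     Returns:
--         True if valid, False otherwise
--     """
--     valid_ops = {'add_line', 'remove_line', 'replace_line', 'insert_at', 'delete_from'}
--
--     for op in operations:
--         if not isinstance(op, dict):
--             return False
--
--         if 'op' not in op:
--             return False
--
--         if op['op'] not in valid_ops: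
--             return False
--
--         # Check required fields based on operation type
--         if op['op'] in ['add_line', 'replace_line', 'insert_at']:
--             if 'content' not in op:
--                 return False
--
--         if op['op'] in ['remove_line', 'replace_line', 'delete_from']:
--             if 'line_number' not in op:
--                 return False
--
--     return True
-- ===== SOURCE B (Python) =====
-- def validate_line_operations(operations):
--     """
--     Validate line-based patch operations.
--
--     Staged passes instead of one validating loop:
--       pass 1: every element is a dict carrying 'op';
--       pass 2: every op name is a known operation;
--       passes 3+: loop over the FIELDS ('content', 'line_number'), and for each
--       field scan the operations that need it, rejecting if it is absent.
--     """
--     if not all(isinstance(op, dict) and 'op' in op for op in operations):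
--         return False
--
--     valid_ops = {'add_line', 'remove_line', 'replace_line', 'insert_at', 'delete_from'}
--     if any(op['op'] not in valid_ops for op in operations):
--         return False
--
--     for field, needs in (('content', {'add_line', 'replace_line', 'insert_at'}),
--                          ('line_number', {'remove_line', 'replace_line', 'delete_from'})):
--         for op in operations:
--             if op['op'] in needs and field not in op:
--                 return False
--
--     return True
-- ===== Notes on version B (the rewrite author's own statement) =====
-- stated objective: alternative
-- what changed: Single validating loop with per-op early returns is replaced by staged whole-list passes with an inverted traversal: first all elements are checked to be dicts with 'op', then all op names are checked against the valid set, then the outer loop runs over the required FIELDS and for each field scans the operations needing it.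
import Mathlib
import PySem

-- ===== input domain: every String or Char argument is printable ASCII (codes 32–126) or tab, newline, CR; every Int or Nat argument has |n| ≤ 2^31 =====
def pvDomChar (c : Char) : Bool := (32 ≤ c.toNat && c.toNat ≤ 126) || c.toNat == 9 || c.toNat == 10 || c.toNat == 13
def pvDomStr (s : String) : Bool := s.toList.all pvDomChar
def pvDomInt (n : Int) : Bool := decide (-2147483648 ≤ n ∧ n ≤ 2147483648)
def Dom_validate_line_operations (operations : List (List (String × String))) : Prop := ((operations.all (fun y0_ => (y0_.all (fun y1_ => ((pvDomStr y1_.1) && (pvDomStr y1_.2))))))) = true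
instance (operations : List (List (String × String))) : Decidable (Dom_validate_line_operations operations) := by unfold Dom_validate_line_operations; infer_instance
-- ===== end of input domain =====

-- B replaces A's single validating loop with staged whole-list passes, the field
-- checks inverted (outer loop over fields, inner scan over operations); objective: alternative.

-- ===== PORT A =====
-- A's loop with early returns, as structural recursion; `'k' in op` / `op['k']` = first-match lookup.
def validate_line_operations (operations : List (List (String × String))) : Bool :=
  match operations with
  | [] => true
  | op :: rest =>
    match op.lookup "op" with
    | none => false                                   -- 'op' not in op
    | some v =>
      if ¬ (v ∈ ["add_line", "remove_line", "replace_line", "insert_at", "delete_from"]) then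
        false                                          -- op['op'] not in valid_ops
      else if v ∈ ["add_line", "replace_line", "insert_at"] && (op.lookup "content").isNone then
        false
      else if v ∈ ["remove_line", "replace_line", "delete_from"] && (op.lookup "line_number").isNone then
        false
      else validate_line_operations rest

-- ===== PORT B =====
-- pass over the operations needing `field`, rejecting if the field is absent
def pvFieldPass (field : String) (needs : List String) (operations : List (List (String × String))) : Bool :=
  operations.all (fun op => !(((op.lookup "op").getD "" ∈ needs) && (op.lookup field).isNone))

def validate_line_operations_alt (operations : List (List (String × String))) : Bool :=
  -- pass 1: every element carries 'op'
  if !(operations.all (fun op => (op.lookup "op").isSome)) then false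
  -- pass 2: every op name is valid
  else if !(operations.all (fun op =>
      (op.lookup "op").getD "" ∈ ["add_line", "remove_line", "replace_line", "insert_at", "delete_from"])) then false
  -- passes 3+: outer loop over the fields, inner scan over operations
  else if !(pvFieldPass "content" ["add_line", "replace_line", "insert_at"] operations) then false
  else if !(pvFieldPass "line_number" ["remove_line", "replace_line", "delete_from"] operations) then false
  else true

-- ===== PRECONDITION & SPEC =====
def Spec_validate_line_operations (operations : List (List (String × String))) (out : Bool) : Prop := out = validate_line_operations_alt operations
instance (operations : List (List (String × String))) (out : Bool) : Decidable (Spec_validate_line_operations operations out) := by unfold Spec_validate_line_operations; infer_instance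

-- ===== CLAIM =====
def Claim_equal_validate_line_operations : Prop := ∀ (operations : List (List (String × String))), Dom_validate_line_operations operations → Spec_validate_line_operations operations (validate_line_operations operations)

-- ===== LEMMAS AND PROOFS =====

-- the per-operation predicate both programs amount to
def pvP (op : List (String × String)) : Bool :=
  (op.lookup "op").isSome
  && (((op.lookup "op").getD "" ∈ ["add_line", "remove_line", "replace_line", "insert_at", "delete_from"])
  && (!((((op.lookup "op").getD "" ∈ ["add_line", "replace_line", "insert_at"]) && (op.lookup "content").isNone))
  && !((((op.lookup "op").getD "" ∈ ["remove_line", "replace_line", "delete_from"]) && (op.lookup "line_number").isNone))))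

theorem all_and4 {α : Type} (l : List α) (p q r s : α → Bool) :
    l.all (fun x => p x && (q x && (r x && s x))) = (l.all p && (l.all q && (l.all r && l.all s))) := by
  induction l with
  | nil => rfl
  | cons a t ih =>
    simp only [List.all_cons, ih]
    cases p a <;> cases q a <;> cases r a <;> cases s a <;> simp

theorem B_eq_all (operations : List (List (String × String))) :
    validate_line_operations_alt operations = operations.all pvP := by
  have key : ∀ a b c d : Bool,
      (if !a then false else if !b then false else if !c then false else if !d then false else true)
        = (a && (b && (c && d))) := by decide
  unfold validate_line_operations_alt pvFieldPass
  rw [key, ← all_and4]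
  rfl

theorem A_eq_all (operations : List (List (String × String))) :
    validate_line_operations operations = operations.all pvP := by
  induction operations with
  | nil => rfl
  | cons op rest ih =>
    rw [validate_line_operations.eq_def, List.all_cons, ← ih]
    cases h : op.lookup "op" with
    | none => simp [pvP, h]
    | some v =>
      simp only [pvP, h, Option.isSome_some, Option.getD_some]
      by_cases hv : v ∈ ["add_line", "remove_line", "replace_line", "insert_at", "delete_from"]
      · simp only [hv, not_true, if_false, decide_true, Bool.true_and]
        cases hc : (op.lookup "content").isNone <;>
        cases hl : (op.lookup "line_number").isNone <;>
        fin_cases hv <;> simp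
      · simp [hv]

theorem validate_line_operations_spec : Claim_equal_validate_line_operations := by
  intro operations _
  show validate_line_operations operations = validate_line_operations_alt operations
  rw [A_eq_all, B_eq_all]
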